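-- pv_equiv track=rewrite | github.com/philornot/SejmBot | SejmBotDetektor/detectors/keyword_detector.py | _char_to_word_position
-- ===== SOURCE A (Python) =====
-- from typing import List, Tuple, Optional
--
-- def _char_to_word_position(content: str, char_position: int) -> Optional[int]:
--     """
--     Konwertuje pozycję znaku na pozycję słowa
--
--     Args:
--         content: Treść tekstowa
--         char_position: Pozycja znaku
--
--     Returns:
--         Pozycja słowa lub None jeśli nie można ustalić
--     """
--     # Podziel tekst na słowa i znajdź pozycję
--     words = content.split()
--     current_char = 0
--
--     for word_idx, word in enumerate(words):
--         word_start = content.find(word, current_char)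
--         if word_start <= char_position < word_start + len(word):
--             return word_idx
--         current_char = word_start + len(word)
--
--     return None
-- ===== SOURCE B (Python) =====
-- from typing import Optional
--
-- def _char_to_word_position(content: str, char_position: int) -> Optional[int]:
--     """Single left-to-right scan: walk word spans directly, no split()/find()."""
--     i = 0
--     idx = 0
--     n = len(content)
--     while i < n:
--         if content[i].isspace():
--             i += 1
--         else:
--             j = i
--             while j < n and not content[j].isspace():
--                 j += 1
--             if i <= char_position < j:
--                 return idx
--             idx += 1
--             i = j
--     return None
-- ===== Notes on version B (the rewrite author's own statement) =====
-- stated objective: alternative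
-- what changed: Replaces split()+repeated content.find() per word by a single left-to-right character scan that tracks word spans and a word counter directly.
import Mathlib
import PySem

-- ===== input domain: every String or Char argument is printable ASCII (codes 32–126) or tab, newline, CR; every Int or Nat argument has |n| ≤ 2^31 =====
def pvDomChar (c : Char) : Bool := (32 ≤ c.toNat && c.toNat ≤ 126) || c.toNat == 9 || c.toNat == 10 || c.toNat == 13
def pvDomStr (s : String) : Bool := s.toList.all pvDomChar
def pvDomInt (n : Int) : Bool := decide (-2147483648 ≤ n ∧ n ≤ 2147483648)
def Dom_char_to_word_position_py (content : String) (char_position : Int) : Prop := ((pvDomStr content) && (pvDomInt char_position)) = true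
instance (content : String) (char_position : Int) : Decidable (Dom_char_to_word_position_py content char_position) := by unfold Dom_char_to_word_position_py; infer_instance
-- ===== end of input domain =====

-- B replaces split()+find() re-scanning by one left-to-right scan over the characters; return-value equivalence (no mutation in either program).

-- ===== PORT A =====
-- A's for-loop over enumerate(words) with its running current_char
def loopA_char_to_word (content : List Char) (pos : Int) :
    List (Int × List Char) → Int → Option Int
  | [], _ => none
  | (word_idx, word) :: rest, current_char =>
    let word_start := PySem.Chars.findFrom content word current_char
    if word_start ≤ pos ∧ pos < word_start + (word.length : Int) then some word_idx
    else loopA_char_to_word content pos rest (word_start + (word.length : Int))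

def char_to_word_position_py (content : String) (char_position : Int) : Option Int :=
  loopA_char_to_word content.toList char_position
    (PySem.List.enumerate (PySem.Chars.split₀ content.toList)) 0

-- ===== PORT B =====
-- B's outer while loop; the inner `while j < n and not isspace` loop is the takeWhile/dropWhile pair
def charScan : List Char → Int → Int → Int → Option Int
  | [], _, _, _ => none
  | c :: rest, i, idx, pos =>
    if hc : PySem.Chars.isspace c = true then charScan rest (i + 1) idx pos
    else
      let w := (c :: rest).takeWhile (fun ch => !PySem.Chars.isspace ch)
      if i ≤ pos ∧ pos < i + (w.length : Int) then some idx
      else charScan ((c :: rest).dropWhile (fun ch => !PySem.Chars.isspace ch))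
            (i + (w.length : Int)) (idx + 1) pos
termination_by cs => cs.length
decreasing_by
  · simp
  · rw [List.dropWhile_cons_of_pos (by simp [hc])]
    have h := List.length_dropWhile_le (fun ch => !PySem.Chars.isspace ch) rest
    simp only [List.length_cons]
    omega

def char_to_word_position_py_alt (content : String) (char_position : Int) : Option Int :=
  charScan content.toList 0 0 char_position

-- ===== PRECONDITION & SPEC =====
def Spec_char_to_word_position_py (content : String) (char_position : Int) (out : Option Int) : Prop := out = char_to_word_position_py_alt content char_position
instance (content : String) (char_position : Int) (out : Option Int) : Decidable (Spec_char_to_word_position_py content char_position out) := by unfold Spec_char_to_word_position_py; infer_instance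

-- ===== CLAIM (what is proved, stated in full; the proofs are below) =====
def Claim_equal_char_to_word_position_py : Prop := ∀ (content : String) (char_position : Int), Dom_char_to_word_position_py content char_position → Spec_char_to_word_position_py content char_position (char_to_word_position_py content char_position)

-- ===== LEMMAS AND PROOFS =====

theorem split0_go_acc (cs : List Char) : ∀ (cur : List Char) (acc : List (List Char)),
    PySem.Chars.split₀.go cs cur acc = acc.reverse ++ PySem.Chars.split₀.go cs cur [] := by
  induction cs with
  | nil =>
    intro cur acc
    simp only [PySem.Chars.split₀.go]
    split_ifs <;> simp
  | cons c rest ih =>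
    intro cur acc
    simp only [PySem.Chars.split₀.go]
    split_ifs with h1 h2
    · exact ih [] acc
    · rw [ih [] (cur.reverse :: acc), ih [] [cur.reverse]]
      simp
    · exact ih (c :: cur) acc

theorem split0_go_word (d : List Char) : ∀ (w cur : List Char) (acc : List (List Char)),
    (∀ c ∈ w, PySem.Chars.isspace c = false) →
    PySem.Chars.split₀.go (w ++ d) cur acc = PySem.Chars.split₀.go d (w.reverse ++ cur) acc := by
  intro w
  induction w with
  | nil => intro cur acc _; simp
  | cons c t ih =>
    intro cur acc h
    have hc : PySem.Chars.isspace c = false := h c (by simp)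
    simp only [List.cons_append, PySem.Chars.split₀.go, hc, Bool.false_eq_true, if_false]
    rw [ih (c :: cur) acc (fun x hx => h x (by simp [hx]))]
    simp

theorem split0_word (w d : List Char) (hw : w ≠ [])
    (hns : ∀ c ∈ w, PySem.Chars.isspace c = false)
    (hd : d = [] ∨ ∃ c t, d = c :: t ∧ PySem.Chars.isspace c = true) :
    PySem.Chars.split₀ (w ++ d) = w :: PySem.Chars.split₀ d := by
  unfold PySem.Chars.split₀
  rw [split0_go_word d w [] [] hns]
  rcases hd with rfl | ⟨c, t, rfl, hc⟩
  · simp only [PySem.Chars.split₀.go]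
    simp [hw]
  · simp only [PySem.Chars.split₀.go, hc, if_true, List.append_nil, List.reverse_reverse,
      List.isEmpty_nil]
    rw [if_neg (by simp [hw]), split0_go_acc t [] [w]]
    simp

theorem split0_cons_space (c : Char) (cs : List Char) (h : PySem.Chars.isspace c = true) :
    PySem.Chars.split₀ (c :: cs) = PySem.Chars.split₀ cs := by
  simp [PySem.Chars.split₀, PySem.Chars.split₀.go, h]

theorem split0_words : ∀ (n : Nat) (cs : List Char), cs.length = n →
    ∀ w ∈ PySem.Chars.split₀ cs, w ≠ [] ∧ ∀ c ∈ w, PySem.Chars.isspace c = false := by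
  intro n
  induction n using Nat.strong_induction_on with
  | _ n ih =>
    intro cs hn w hw
    match cs, hn with
    | [], _ => simp [PySem.Chars.split₀, PySem.Chars.split₀.go] at hw
    | c :: t, hn =>
      by_cases hc : PySem.Chars.isspace c = true
      · rw [split0_cons_space c t hc] at hw
        have hn' : t.length + 1 = n := by simpa using hn
        exact ih t.length (by omega) t rfl w hw
      · have hq : (fun ch => !PySem.Chars.isspace ch) c = true := by simp [hc]
        have hsplit := List.takeWhile_append_dropWhile
          (p := fun ch => !PySem.Chars.isspace ch) (l := c :: t)
        set w0 := (c :: t).takeWhile (fun ch => !PySem.Chars.isspace ch) with hw0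
        set d := (c :: t).dropWhile (fun ch => !PySem.Chars.isspace ch) with hd0
        have hw0ne : w0 ≠ [] := by
          rw [hw0]; simp [hq]
        have hns : ∀ x ∈ w0, PySem.Chars.isspace x = false := by
          intro x hx
          have := List.mem_takeWhile_imp hx
          simpa using this
        have hdspace : d = [] ∨ ∃ c' t', d = c' :: t' ∧ PySem.Chars.isspace c' = true := by
          have := List.head?_dropWhile_not (fun ch => !PySem.Chars.isspace ch) (c :: t)
          rw [← hd0] at this
          match hdm : d, this with
          | [], _ => exact Or.inl rfl
          | c' :: t', h2 =>
            refine Or.inr ⟨c', t', rfl, ?_⟩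
            rw [hdm] at this
            simpa using this
        have hdlen : d.length < n := by
          have hde : d = t.dropWhile (fun ch => !PySem.Chars.isspace ch) := by
            rw [hd0]; simp [hq]
          have h2 := List.length_dropWhile_le (fun ch => !PySem.Chars.isspace ch) t
          have hn' : t.length + 1 = n := by simpa using hn
          rw [hde]; omega
        rw [← hsplit, split0_word w0 d hw0ne hns hdspace] at hw
        rcases List.mem_cons.mp hw with rfl | hw2
        · exact ⟨hw0ne, hns⟩
        · exact ih d.length hdlen d rfl w hw2

theorem find_go_ge (sub : List Char) : ∀ (l : List Char) (k : Nat),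
    PySem.Chars.find.go sub l k = -1 ∨ (k : Int) ≤ PySem.Chars.find.go sub l k := by
  intro l
  induction l with
  | nil =>
    intro k
    simp only [PySem.Chars.find.go]
    split_ifs <;> omega
  | cons c t ih =>
    intro k
    simp only [PySem.Chars.find.go]
    split_ifs with h1
    · omega
    · rcases ih (k + 1) with h | h
      · exact Or.inl h
      · right; push_cast at h ⊢; omega

theorem find_go_shift (sub : List Char) : ∀ (l : List Char) (k : Nat),
    PySem.Chars.find.go sub l k =
      if PySem.Chars.find l sub = -1 then -1 else PySem.Chars.find l sub + (k : Int) := by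
  intro l
  induction l with
  | nil =>
    intro k
    simp only [PySem.Chars.find, PySem.Chars.find.go]
    split_ifs with h1 h2 <;> simp_all
  | cons c t ih =>
    intro k
    by_cases h1 : sub.isPrefixOf (c :: t) = true
    · simp [PySem.Chars.find, PySem.Chars.find.go, h1]
    · simp only [PySem.Chars.find, PySem.Chars.find.go, h1, Bool.false_eq_true, if_false]
      rw [ih (k + 1), ih 1]
      have h0 : PySem.Chars.find t sub = PySem.Chars.find.go sub t 0 := rfl
      rcases find_go_ge sub t 0 with hg | hg <;> rw [← h0] at hg <;>
        split_ifs <;> push_cast <;> omega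

theorem find_cons (c : Char) (t sub : List Char) :
    PySem.Chars.find (c :: t) sub =
      if sub.isPrefixOf (c :: t) then 0
      else if PySem.Chars.find t sub = -1 then -1 else PySem.Chars.find t sub + 1 := by
  by_cases h1 : sub.isPrefixOf (c :: t) = true
  · simp [PySem.Chars.find, PySem.Chars.find.go, h1]
  · have h2 : PySem.Chars.find (c :: t) sub = PySem.Chars.find.go sub t 1 := by
      simp [PySem.Chars.find, PySem.Chars.find.go, h1]
    rw [h2, find_go_shift]
    simp [h1]

theorem loopA_skip_space (p : List Char) (c : Char) (rest2 : List Char) (pos idx : Int)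
    (hc : PySem.Chars.isspace c = true) :
    loopA_char_to_word (p ++ c :: rest2) pos
        (PySem.List.enumerate (PySem.Chars.split₀ rest2) idx) (p.length : Int)
      = loopA_char_to_word (p ++ c :: rest2) pos
        (PySem.List.enumerate (PySem.Chars.split₀ rest2) idx) ((p.length : Int) + 1) := by
  cases hsp : PySem.Chars.split₀ rest2 with
  | nil => simp [PySem.List.enumerate, loopA_char_to_word]
  | cons w L =>
    obtain ⟨hwne, hns⟩ := split0_words rest2.length rest2 rfl w (by rw [hsp]; simp)
    obtain ⟨wc, w', rfl⟩ := List.exists_cons_of_ne_nil hwne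
    have hpre : (wc :: w').isPrefixOf (c :: rest2) = false := by
      by_contra hpc
      have hb : (wc :: w').isPrefixOf (c :: rest2) = true := by
        simpa using hpc
      rcases List.cons_prefix_cons.mp (List.isPrefixOf_iff_prefix.mp hb) with ⟨rfl, _⟩
      have := hns wc (by simp)
      rw [this] at hc; exact Bool.false_ne_true hc
    have key : PySem.Chars.findFrom (p ++ c :: rest2) (wc :: w') (p.length : Int) none
             = PySem.Chars.findFrom (p ++ c :: rest2) (wc :: w') ((p.length : Int) + 1) none := by
      have h1 : p.length ≤ (p ++ c :: rest2).length := by simp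
      have h2 : p.length + 1 ≤ (p ++ c :: rest2).length := by simp
      have e1 : (p ++ c :: rest2).drop p.length = c :: rest2 := List.drop_left
      have e2 : (p ++ c :: rest2).drop (p.length + 1) = rest2 := by
        have h3 : p ++ c :: rest2 = (p ++ [c]) ++ rest2 := by simp
        rw [h3]
        have h4 := List.drop_left (l₁ := p ++ [c]) (l₂ := rest2)
        simp only [List.length_append, List.length_cons, List.length_nil] at h4
        exact h4
      have c1 := PySem.Chars.findFrom_natCast (p ++ c :: rest2) (wc :: w') p.length h1
      have c2 := PySem.Chars.findFrom_natCast (p ++ c :: rest2) (wc :: w') (p.length + 1) h2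
      rw [e1] at c1; rw [e2] at c2
      rw [c1, show ((p.length : Int) + 1) = ((p.length + 1 : Nat) : Int) by push_cast; ring,
        c2, find_cons c rest2 (wc :: w'), hpre]
      simp only [Bool.false_eq_true, if_false]
      have hg : PySem.Chars.find rest2 (wc :: w') = -1 ∨ 0 ≤ PySem.Chars.find rest2 (wc :: w') := by
        simpa [PySem.Chars.find] using find_go_ge (wc :: w') rest2 0
      push_cast
      split_ifs <;> omega
    simp only [PySem.List.enumerate_cons, loopA_char_to_word]
    rw [key]

theorem loopA_eq_scan : ∀ (n : Nat) (rest' p : List Char) (idx pos : Int), rest'.length = n →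
    loopA_char_to_word (p ++ rest') pos
        (PySem.List.enumerate (PySem.Chars.split₀ rest') idx) (p.length : Int)
      = charScan rest' (p.length : Int) idx pos := by
  intro n
  induction n using Nat.strong_induction_on with
  | _ n ih =>
    intro rest' p idx pos hn
    match rest', hn with
    | [], _ =>
      simp [PySem.Chars.split₀, PySem.Chars.split₀.go,
        loopA_char_to_word, charScan]
    | c :: rest2, hn =>
      have hn' : rest2.length + 1 = n := by simpa using hn
      by_cases hc : PySem.Chars.isspace c = true
      · rw [split0_cons_space c rest2 hc, loopA_skip_space p c rest2 pos idx hc,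
          show p ++ c :: rest2 = (p ++ [c]) ++ rest2 by simp]
        have h5 := ih rest2.length (by omega) rest2 (p ++ [c]) idx pos rfl
        rw [show (((p ++ [c]).length : Nat) : Int) = (p.length : Int) + 1 by simp] at h5
        rw [h5, charScan, dif_pos hc]
      · have hqc : (fun ch => !PySem.Chars.isspace ch) c = true := by simp [hc]
        have hsplit : (c :: rest2).takeWhile (fun ch => !PySem.Chars.isspace ch)
            ++ (c :: rest2).dropWhile (fun ch => !PySem.Chars.isspace ch) = c :: rest2 :=
          List.takeWhile_append_dropWhile
        set w := (c :: rest2).takeWhile (fun ch => !PySem.Chars.isspace ch) with hw0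
        set d := (c :: rest2).dropWhile (fun ch => !PySem.Chars.isspace ch) with hd0
        have hwne : w ≠ [] := by rw [hw0]; simp [hqc]
        have hns : ∀ x ∈ w, PySem.Chars.isspace x = false := by
          intro x hx
          simpa using List.mem_takeWhile_imp hx
        have hdspace : d = [] ∨ ∃ c' t', d = c' :: t' ∧ PySem.Chars.isspace c' = true := by
          have h6 := List.head?_dropWhile_not (fun ch => !PySem.Chars.isspace ch) (c :: rest2)
          rw [← hd0] at h6
          match hdm : d, h6 with
          | [], _ => exact Or.inl rfl
          | c' :: t', h7 =>
            refine Or.inr ⟨c', t', rfl, ?_⟩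
            rw [hdm] at h6
            simpa using h6
        have hdlen : d.length < n := by
          have hde : d = rest2.dropWhile (fun ch => !PySem.Chars.isspace ch) := by
            rw [hd0]; simp [hqc]
          have h8 := List.length_dropWhile_le (fun ch => !PySem.Chars.isspace ch) rest2
          rw [hde]; omega
        have hfz : PySem.Chars.find (c :: rest2) w = 0 := by
          have hpre : w.isPrefixOf (c :: rest2) = true := by
            rw [← hsplit]; exact List.isPrefixOf_iff_prefix.mpr (List.prefix_append _ _)
          rw [find_cons c rest2 w, if_pos hpre]
        have hfind : PySem.Chars.findFrom (p ++ c :: rest2) w (p.length : Int) none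
            = (p.length : Int) := by
          have h1 : p.length ≤ (p ++ c :: rest2).length := by simp
          have c1 := PySem.Chars.findFrom_natCast (p ++ c :: rest2) w p.length h1
          rw [List.drop_left, hfz] at c1
          simpa using c1
        rw [charScan, dif_neg (by simp [hc]), ← hw0, ← hd0]
        rw [show PySem.Chars.split₀ (c :: rest2) = w :: PySem.Chars.split₀ d by
            rw [← hsplit]; exact split0_word w d hwne hns hdspace,
          PySem.List.enumerate_cons]
        simp only [loopA_char_to_word, hfind]
        by_cases hif : (p.length : Int) ≤ pos ∧ pos < (p.length : Int) + (w.length : Int)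
        · rw [if_pos hif, if_pos hif]
        · rw [if_neg hif, if_neg hif]
          have h9 := ih d.length hdlen d (p ++ w) (idx + 1) pos rfl
          rw [show (((p ++ w).length : Nat) : Int) = (p.length : Int) + (w.length : Int)
            by simp] at h9
          rw [show p ++ c :: rest2 = (p ++ w) ++ d by rw [← hsplit]; simp, h9]

-- ===== VERDICT (by name: the statement is the Claim_ definition above) =====
theorem char_to_word_position_py_spec : Claim_equal_char_to_word_position_py := by
  intro content pos _
  unfold Spec_char_to_word_position_py char_to_word_position_py char_to_word_position_py_alt
  have h := loopA_eq_scan content.toList.length content.toList [] 0 pos rfl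
  simpa using h
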